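-- pv_equiv track=rewrite | github.com/sqarrt/IDEACrypt | main.py | split_int
-- ===== SOURCE A (Python) =====
-- def split_int(val, bsize = 8):
--     arr = []
--     lval = val
--     for i in range(bsize):
--         arr.append(lval % (2**16))
--         lval = lval >> 16
--     arr.reverse()
--     return arr
-- ===== SOURCE B (Python) =====
-- def split_int(val, bsize=8):
--     # Divide and conquer: split the value into high and low halves and
--     # recurse on each; depth is O(log bsize) instead of a linear loop.
--     if bsize <= 0:
--         return []
--     if bsize == 1:
--         return [val & 0xFFFF]
--     lo = bsize // 2
--     hi = bsize - lo
--     return split_int(val >> (16 * lo), hi) + split_int(val % (1 << (16 * lo)), lo)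
-- ===== Notes on version B (the rewrite author's own statement) =====
-- stated objective: alternative
-- what changed: B replaces A's linear shift-accumulate loop with a final reverse by a divide-and-conquer recursion: the word list is the split of the high half (val >> 16*lo) concatenated with the split of the masked low half (val % (1 << 16*lo)), recursion depth O(log bsize), no running state and no reverse.
import Mathlib
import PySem

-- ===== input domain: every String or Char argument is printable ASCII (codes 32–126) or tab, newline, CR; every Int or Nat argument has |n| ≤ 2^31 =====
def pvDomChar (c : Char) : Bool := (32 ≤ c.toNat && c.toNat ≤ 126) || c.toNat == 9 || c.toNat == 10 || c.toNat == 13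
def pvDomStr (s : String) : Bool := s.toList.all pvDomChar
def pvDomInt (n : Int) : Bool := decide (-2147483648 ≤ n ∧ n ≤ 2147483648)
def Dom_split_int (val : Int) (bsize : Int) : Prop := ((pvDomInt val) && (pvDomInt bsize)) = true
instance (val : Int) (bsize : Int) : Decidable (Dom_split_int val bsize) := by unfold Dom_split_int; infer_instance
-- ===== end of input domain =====

-- B splits the value divide-and-conquer into high/low halves (recursion depth O(log bsize)) instead of A's linear shift-accumulate-reverse loop: alternative algorithm, same O(bsize) work.


-- ===== PORT A =====
def split_int (val : Int) (bsize : Int) : List Int :=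
  -- arr = []; lval = val; for i in range(bsize): arr.append(lval % 2**16); lval >>= 16
  -- Python's 'lval >> 16' is Lean's 'lval >>> 16' (arithmetic shift, floors on negatives)
  let r := (PySem.List.pyRange 0 bsize 1).foldl
    (fun (s : List Int × Int) _ => (s.1 ++ [PySem.Int.mod s.2 65536], s.2 >>> (16:Nat))) ([], val)
  r.1.reverse

-- ===== PORT B =====
def split_int_alt (val : Int) (bsize : Int) : List Int :=
  -- if bsize <= 0: []; if bsize == 1: [val & 0xFFFF]; else recurse on the halves.
  -- 'val & 0xFFFF' is ported as 'mod val 65536' (exact for every Python int, incl. negatives);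
  -- '1 << (16*lo)' is ported as '2 ^ (16*lo)' ('.toNat' exact: lo ≥ 1 here);
  -- 'val >> (16*lo)' is '>>>' (arithmetic shift); '%' is PySem.Int.mod.
  if bsize ≤ 0 then []
  else if bsize = 1 then [PySem.Int.mod val 65536]
  else
    split_int_alt (val >>> (16 * PySem.Int.floordiv bsize 2).toNat)
        (bsize - PySem.Int.floordiv bsize 2) ++
      split_int_alt (PySem.Int.mod val ((2 : Int) ^ (16 * PySem.Int.floordiv bsize 2).toNat))
        (PySem.Int.floordiv bsize 2)
termination_by bsize.toNat
decreasing_by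
  all_goals
    rename_i h0 h1
    rw [PySem.Int.floordiv_eq_ediv_of_pos (by omega)]
    omega

-- ===== PRECONDITION & SPEC =====
def Spec_split_int (val : Int) (bsize : Int) (out : List Int) : Prop := out = split_int_alt val bsize
instance (val : Int) (bsize : Int) (out : List Int) : Decidable (Spec_split_int val bsize out) := by unfold Spec_split_int; infer_instance

-- ===== CLAIM (what is proved, stated in full; the proofs are below) =====
def Claim_equal_split_int : Prop := ∀ (val : Int) (bsize : Int), Dom_split_int val bsize → Spec_split_int val bsize (split_int val bsize)

-- ===== LEMMAS AND PROOFS =====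

-- Common characterisation: the n 16-bit words of val, most significant first.
def pvWords (val : Int) (n : Nat) : List Int :=
  ((List.range n).map (fun k : Nat => PySem.Int.mod (val >>> (16 * k : Nat)) 65536)).reverse

-- A's loop, after n iterations: arr holds the low n words LSW-first, lval is val shifted 16n.
theorem splitA_foldl (n : Nat) : ∀ (arr : List Int) (lv : Int),
    (List.range n).foldl
      (fun (s : List Int × Int) _ => (s.1 ++ [PySem.Int.mod s.2 65536], s.2 >>> (16:Nat))) (arr, lv)
    = (arr ++ (List.range n).map (fun k : Nat => PySem.Int.mod (lv >>> (16 * k : Nat)) 65536),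
       lv >>> (16 * n : Nat)) := by
  induction n with
  | zero => intro arr lv; simp
  | succ m ih =>
      intro arr lv
      simp only [List.range_succ, List.foldl_append, List.foldl_cons, List.foldl_nil,
        List.map_append, List.map_cons, List.map_nil, ih]
      refine Prod.ext ?_ ?_
      · simp [List.append_assoc]
      · show lv >>> (16 * m : Nat) >>> (16:Nat) = lv >>> (16 * (m+1) : Nat)
        rw [← Int.shiftRight_add]; ring_nf

theorem split_int_eq (val bsize : Int) : split_int val bsize = pvWords val bsize.toNat := by
  unfold split_int pvWords
  rw [PySem.List.pyRange_one]
  rw [List.foldl_map]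
  simp only [Int.sub_zero]
  rw [splitA_foldl bsize.toNat [] val]
  simp

-- A word of the low part: for k < lo, masking off the high bits does not change word k.
theorem low_word (val : Int) (lo k : Nat) (h : k < lo) :
    ((val % (2:Int)^(16*lo)) / 2^(16*k)) % 65536 = (val / 2^(16*k)) % 65536 := by
  obtain ⟨d, hd⟩ : ∃ d : Nat, 16*lo = 16*k + 16 + d := ⟨16*lo - 16*k - 16, by omega⟩
  rw [hd]
  have hp : (2:Int)^(16*k+16+d) = (2^(16+d)) * 2^(16*k) := by rw [← pow_add]; congr 1; omega
  have hval : val = val % (2:Int)^(16*k+16+d)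
      + (val / (2:Int)^(16*k+16+d) * 2^(16+d)) * 2^(16*k) := by
    have h1 := Int.emod_add_mul_ediv val ((2:Int)^(16*k+16+d))
    have h2 : (val / (2:Int)^(16*k+16+d) * 2^(16+d)) * 2^(16*k)
        = (2:Int)^(16*k+16+d) * (val / 2^(16*k+16+d)) := by rw [hp]; ring
    linarith [h1, h2]
  have h3 : val / (2:Int)^(16*k) = (val % (2:Int)^(16*k+16+d)) / 2^(16*k)
      + val / (2:Int)^(16*k+16+d) * 2^(16+d) := by
    conv_lhs => rw [hval]
    exact Int.add_mul_ediv_right _ _ (by positivity)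
  have h4 : val / (2:Int)^(16*k+16+d) * 2^(16+d)
      = 65536 * (val / (2:Int)^(16*k+16+d) * 2^d) := by
    rw [pow_add]; ring
  rw [h3, h4, Int.add_mul_emod_self_left]

-- The word list splits at any cut point lo: high words are words of val>>16lo, low words of val % 2^16lo.
theorem words_merge (val : Int) (lo hi : Nat) :
    pvWords val (lo + hi)
    = pvWords (val >>> (16*lo : Nat)) hi ++ pvWords (val % (2:Int)^(16*lo)) lo := by
  unfold pvWords
  rw [List.range_add, List.map_append, List.reverse_append, List.map_map]
  congr 1
  · refine congrArg _ (List.map_congr_left ?_)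
    intro k _
    simp only [Function.comp]
    rw [← Int.shiftRight_add]
    congr 2
    omega
  · refine congrArg _ (List.map_congr_left ?_)
    intro k hk
    rw [List.mem_range] at hk
    have h65536 : PySem.Int.mod ((val % (2:Int)^(16*lo)) >>> (16*k : Nat)) 65536
        = PySem.Int.mod (val >>> (16*k : Nat)) 65536 := by
      rw [PySem.Int.mod_eq_emod_of_pos (by norm_num), PySem.Int.mod_eq_emod_of_pos (by norm_num)]
      rw [Int.shiftRight_eq_div_pow, Int.shiftRight_eq_div_pow]
      exact low_word val lo k hk
    exact h65536.symm

-- B computes exactly the word list, by strong induction on the word count.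
theorem alt_words : ∀ (m : Nat) (val n : Int), n.toNat = m → split_int_alt val n = pvWords val m := by
  intro m
  induction m using Nat.strong_induction_on with
  | _ m ih =>
    intro val n hm
    by_cases h0 : n ≤ 0
    · rw [split_int_alt]
      simp only [h0, if_true]
      have : m = 0 := by omega
      simp [this, pvWords]
    · by_cases h1 : n = 1
      · rw [split_int_alt]
        simp only [h1, if_true]
        have : m = 1 := by omega
        simp [this, pvWords]
      · have hn2 : 2 ≤ n := by omega
        have hfl : PySem.Int.floordiv n 2 = n / 2 :=
          PySem.Int.floordiv_eq_ediv_of_pos (by omega)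
        rw [split_int_alt]
        simp only [h0, if_false, h1, if_false]
        have hlo1 : 1 ≤ PySem.Int.floordiv n 2 := by rw [hfl]; omega
        have hlon : PySem.Int.floordiv n 2 < n := by rw [hfl]; omega
        have hcast : ((16 * PySem.Int.floordiv n 2).toNat) = 16 * (PySem.Int.floordiv n 2).toNat := by
          omega
        rw [ih (PySem.Int.floordiv n 2).toNat (by omega) _ (PySem.Int.floordiv n 2) rfl,
            ih (n - PySem.Int.floordiv n 2).toNat (by omega) _ (n - PySem.Int.floordiv n 2) rfl]
        have hmod : PySem.Int.mod val ((2:Int) ^ (16 * PySem.Int.floordiv n 2).toNat)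
            = val % (2:Int)^(16 * (PySem.Int.floordiv n 2).toNat) := by
          rw [PySem.Int.mod_eq_emod_of_pos (by positivity), hcast]
        rw [hmod, hcast]
        have hsplit : m = (PySem.Int.floordiv n 2).toNat + (n - PySem.Int.floordiv n 2).toNat := by
          omega
        rw [hsplit, words_merge]

-- ===== VERDICT (by name: the statement is the Claim_ definition above) =====
theorem split_int_spec : Claim_equal_split_int := by
  intro val bsize _
  unfold Spec_split_int
  rw [split_int_eq, alt_words bsize.toNat val bsize rfl]
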